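-- pv_equiv track=rewrite | github.com/amol-ship-it/agi-core | domains/arc/primitives.py | extend_to_border_h
-- ===== SOURCE A (Python) =====
-- Grid = list[list[int]]
--
-- def extend_to_border_h(grid: Grid) -> Grid:
--     """Extend each non-zero cell horizontally to fill its row."""
--     if not grid or not grid[0]:
--         return grid
--     h, w = len(grid), len(grid[0])
--     result = [[0] * w for _ in range(h)]
--     for r in range(h):
--         nz = [(c, grid[r][c]) for c in range(w) if grid[r][c] != 0]
--         if not nz:
--             continue
--         if len(set(v for _, v in nz)) == 1:
--             result[r] = [nz[0][1]] * w
--         else: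
--             row = [0] * w
--             last = 0
--             for c in range(w):
--                 if grid[r][c] != 0:
--                     last = grid[r][c]
--                 row[c] = last
--             last = 0
--             for c in range(w - 1, -1, -1):
--                 if row[c] == 0 and last != 0:
--                     row[c] = last
--                 elif grid[r][c] != 0:
--                     last = row[c]
--             result[r] = row
--     return result
-- ===== SOURCE B (Python) =====
-- def extend_to_border_h(grid):
--     """Extend each non-zero cell horizontally to fill its row."""
--     if not grid or not grid[0]:
--         return grid
--     w = len(grid[0])
--     result = []
--     for row in grid:
--         vals = [row[c] for c in range(w)]
--         last = next((v for v in vals if v != 0), 0)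
--         out = []
--         for v in vals:
--             if v != 0:
--                 last = v
--             out.append(last)
--         result.append(out)
--     return result
-- ===== Notes on version B (the rewrite author's own statement) =====
-- stated objective: simpler
-- what changed: Replaces A's three-way row handling (nonzero-pair collection, all-equal set shortcut, forward pass plus backward fix-up pass over a mutated buffer) with a single forward carry pass per row seeded with the row's first nonzero value.
import Mathlib
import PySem

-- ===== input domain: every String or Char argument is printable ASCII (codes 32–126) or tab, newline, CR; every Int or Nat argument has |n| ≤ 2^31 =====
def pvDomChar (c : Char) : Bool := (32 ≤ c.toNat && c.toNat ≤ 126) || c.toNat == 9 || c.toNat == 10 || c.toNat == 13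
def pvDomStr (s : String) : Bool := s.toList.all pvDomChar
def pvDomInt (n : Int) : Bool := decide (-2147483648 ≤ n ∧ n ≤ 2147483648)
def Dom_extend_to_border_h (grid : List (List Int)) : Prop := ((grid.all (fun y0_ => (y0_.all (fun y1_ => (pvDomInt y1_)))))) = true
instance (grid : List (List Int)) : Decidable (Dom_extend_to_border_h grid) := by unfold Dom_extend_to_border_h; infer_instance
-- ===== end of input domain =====

-- B replaces A's per-row three-way case split (nonzero collection, all-equal shortcut,
-- forward pass + backward fix-up over a mutated buffer) by one forward carry pass seeded
-- with the row's first nonzero value; equal return values on Pre_ (objective: simpler).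

-- ===== PORT A =====
-- per-row body of A's loop (the literal code of the 'for r in range(h)' body);
-- 'continue' leaves result[r] = [0]*w, so that branch yields the untouched row of zeros
def pvArow (w : Int) (rowr : List Int) : List Int :=
  let nz := (PySem.List.pyRange 0 w 1).foldl
    (fun acc c => if PySem.List.pyGetD rowr c 0 ≠ 0 then acc ++ [(c, PySem.List.pyGetD rowr c 0)] else acc)
    ([] : List (Int × Int))
  if nz = [] then List.replicate w.toNat 0
  else if (PySem.Set.ofList (nz.map (·.2))).length = 1 then
    List.replicate w.toNat (nz.headD (0, 0)).2
  else
    let fwd := (PySem.List.pyRange 0 w 1).foldl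
      (fun (st : List Int × Int) c =>
        (st.1.set c.toNat (if PySem.List.pyGetD rowr c 0 ≠ 0 then PySem.List.pyGetD rowr c 0 else st.2),
         if PySem.List.pyGetD rowr c 0 ≠ 0 then PySem.List.pyGetD rowr c 0 else st.2))
      (List.replicate w.toNat 0, 0)
    let bwd := (PySem.List.pyRange (w - 1) (-1) (-1)).foldl
      (fun (st : List Int × Int) c =>
        if PySem.List.pyGetD st.1 c 0 = 0 ∧ st.2 ≠ 0 then (st.1.set c.toNat st.2, st.2)
        else if PySem.List.pyGetD rowr c 0 ≠ 0 then (st.1, PySem.List.pyGetD st.1 c 0)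
        else st)
      (fwd.1, 0)
    bwd.1

def extend_to_border_h (grid : List (List Int)) : List (List Int) :=
  if grid = [] ∨ grid.headD [] = [] then grid
  else
    let h : Int := grid.length
    let w : Int := (grid.headD []).length
    (PySem.List.pyRange 0 h 1).map (fun r => pvArow w (PySem.List.pyGetD grid r []))

-- ===== PORT B =====
-- per-row body of B's loop: one forward carry pass seeded with the first nonzero value
def pvBrow (w : Int) (row : List Int) : List Int :=
  let vals := (PySem.List.pyRange 0 w 1).map (fun c => PySem.List.pyGetD row c 0)
  let first := (vals.find? (fun v => v != 0)).getD 0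
  (vals.foldl
    (fun (st : List Int × Int) v =>
      (st.1 ++ [if v ≠ 0 then v else st.2], if v ≠ 0 then v else st.2))
    (([] : List Int), first)).1

def extend_to_border_h_alt (grid : List (List Int)) : List (List Int) :=
  if grid = [] ∨ grid.headD [] = [] then grid
  else grid.map (pvBrow ((grid.headD []).length : Int))

-- ===== PRECONDITION & SPEC =====
-- Pre_ excludes exactly the ragged grids on which both Pythons raise IndexError:
-- some row shorter than the first row (indexed with c in range(len(grid[0]))).
def Pre_extend_to_border_h (grid : List (List Int)) : Prop :=
  ∀ row ∈ grid, (grid.headD []).length ≤ row.length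
instance (grid : List (List Int)) : Decidable (Pre_extend_to_border_h grid) := by
  unfold Pre_extend_to_border_h; infer_instance

def pvWitness_extend_to_border_h : List (List Int) := [[1, 0, 2], [0, 5, 0], [0, 0, 0]]

def Spec_extend_to_border_h (grid : List (List Int)) (out : List (List Int)) : Prop :=
  out = extend_to_border_h_alt grid
instance (grid : List (List Int)) (out : List (List Int)) : Decidable (Spec_extend_to_border_h grid out) := by
  unfold Spec_extend_to_border_h; infer_instance

-- ===== CLAIM (what is proved, stated in full; the proofs are below) =====
def Claim_equal_extend_to_border_h : Prop :=
  ∀ (grid : List (List Int)), Dom_extend_to_border_h grid →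
    Pre_extend_to_border_h grid →
    Spec_extend_to_border_h grid (extend_to_border_h grid)

-- ===== LEMMAS AND PROOFS =====

-- forward carry scan: value at each position = nearest nonzero to the left, else the seed
def pvScan : Int → List Int → List Int
  | _, [] => []
  | a, v :: t => (if v ≠ 0 then v else a) :: pvScan (if v ≠ 0 then v else a) t

-- carry value after scanning the whole list
def pvLast : Int → List Int → Int
  | a, [] => a
  | a, v :: t => pvLast (if v ≠ 0 then v else a) t

-- first nonzero value of a list, 0 if none
def pvFz (vs : List Int) : Int := (vs.find? (fun v => decide (v ≠ 0))).getD 0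

-- values read by a row pass: [g 0, …, g (n-1)]
def pvVg (g : Int → Int) (n : Nat) : List Int := (PySem.List.pyRange 0 (n : Int) 1).map g

theorem pvVg_succ (g : Int → Int) (n : Nat) : pvVg g (n + 1) = pvVg g n ++ [g n] := by
  have h : ((n + 1 : Nat) : Int) = (n : Int) + 1 := by push_cast; ring
  unfold pvVg
  rw [h, PySem.List.pyRange_one_succ_right (by exact_mod_cast Nat.zero_le n), List.map_append]
  rfl

theorem pvScan_length (a : Int) (vs : List Int) : (pvScan a vs).length = vs.length := by
  induction vs generalizing a with
  | nil => rfl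
  | cons v t ih => simp [pvScan, ih]

theorem pvScan_append1 (a v : Int) (xs : List Int) :
    pvScan a (xs ++ [v]) = pvScan a xs ++ [if v ≠ 0 then v else pvLast a xs] := by
  induction xs generalizing a with
  | nil => simp [pvScan, pvLast]
  | cons x t ih => simp [pvScan, pvLast, ih]

theorem pvLast_append1 (a v : Int) (xs : List Int) :
    pvLast a (xs ++ [v]) = if v ≠ 0 then v else pvLast a xs := by
  induction xs generalizing a with
  | nil => simp [pvLast]
  | cons x t ih => simp [pvLast, ih]

theorem pvFz_zero_iff (vs : List Int) : pvFz vs = 0 ↔ ∀ v ∈ vs, v = 0 := by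
  induction vs with
  | nil => simp [pvFz]
  | cons v t ih =>
    by_cases hv : v = 0
    · subst hv; simpa [pvFz, List.find?] using ih
    · simp [pvFz, List.find?, hv]

theorem pvFz_append1 (v : Int) (xs : List Int) :
    pvFz (xs ++ [v]) = if pvFz xs ≠ 0 then pvFz xs else if v ≠ 0 then v else 0 := by
  induction xs with
  | nil => by_cases hv : v = 0 <;> simp [pvFz, List.find?, hv]
  | cons x t ih =>
    by_cases hx : x = 0
    · subst hx; simpa [pvFz, List.find?] using ih
    · simp [pvFz, List.find?, hx]

theorem pvLast_allzero (a : Int) (vs : List Int) (h : ∀ v ∈ vs, v = 0) : pvLast a vs = a := by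
  induction vs generalizing a with
  | nil => rfl
  | cons v t ih =>
    have hv := h v (List.mem_cons_self ..)
    simp only [pvLast, hv]
    exact ih a (fun x hx => h x (List.mem_cons_of_mem _ hx))

theorem pvLast_indep (a b : Int) (vs : List Int) (h : pvFz vs ≠ 0) : pvLast a vs = pvLast b vs := by
  induction vs generalizing a b with
  | nil => simp [pvFz, List.find?] at h
  | cons v t ih =>
    by_cases hv : v = 0
    · subst hv
      have h' : pvFz t ≠ 0 := by simpa [pvFz, List.find?] using h
      simpa [pvLast] using ih a b h'
    · simp [pvLast, hv]

theorem pvScan_const (x : Int) (vs : List Int) (h : ∀ v ∈ vs, v = 0 ∨ v = x) :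
    pvScan x vs = List.replicate vs.length x := by
  induction vs with
  | nil => rfl
  | cons v t ih =>
    have hv := h v (List.mem_cons_self ..)
    have ht := ih (fun x hx => h x (List.mem_cons_of_mem _ hx))
    rcases hv with hv | hv <;> subst hv <;> simp [pvScan, List.replicate_succ, ht]

-- B's loop accumulates the scan
theorem pvB_fold (vs acc : List Int) (a : Int) :
    vs.foldl (fun (st : List Int × Int) v =>
      (st.1 ++ [if v ≠ 0 then v else st.2], if v ≠ 0 then v else st.2)) (acc, a)
    = (acc ++ pvScan a vs, pvLast a vs) := by
  induction vs generalizing acc a with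
  | nil => simp [pvScan, pvLast]
  | cons v t ih => simp only [pvScan, pvLast, List.foldl_cons]; rw [ih]; simp

theorem pvVg_length (g : Int → Int) (n : Nat) : (pvVg g n).length = n := by
  simp [pvVg, PySem.List.length_pyRange_one]

theorem pvLast_nz (a : Int) (vs : List Int) (h : pvFz vs ≠ 0) : pvLast a vs ≠ 0 := by
  induction vs generalizing a with
  | nil => simp [pvFz, List.find?] at h
  | cons v t ih =>
    by_cases hv : v = 0
    · subst hv
      have h' : pvFz t ≠ 0 := by simpa [pvFz, List.find?] using h
      simpa [pvLast] using ih a h'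
    · simp only [pvLast, if_pos hv]
      by_cases ht : pvFz t = 0
      · rw [pvLast_allzero v t ((pvFz_zero_iff t).mp ht)]; exact hv
      · exact ih v ht

theorem pvGetD_concat (xs : List Int) (z : Int) :
    PySem.List.pyGetD (xs ++ [z]) ((xs.length : Int)) 0 = z := by
  rw [PySem.List.pyGetD_eq_getElem _ _ (by positivity) (by simp)]
  simp

-- A's forward loop: indices < length of the left part never touch the right part
theorem pvF_split (g : Int → Int) (L xs ys : List Int) (a : Int)
    (h : ∀ c ∈ L, 0 ≤ c ∧ c.toNat < xs.length) :
    L.foldl (fun (st : List Int × Int) c =>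
        (st.1.set c.toNat (if g c ≠ 0 then g c else st.2), if g c ≠ 0 then g c else st.2))
      (xs ++ ys, a)
    = ((L.foldl (fun (st : List Int × Int) c =>
        (st.1.set c.toNat (if g c ≠ 0 then g c else st.2), if g c ≠ 0 then g c else st.2))
      (xs, a)).1 ++ ys,
       (L.foldl (fun (st : List Int × Int) c =>
        (st.1.set c.toNat (if g c ≠ 0 then g c else st.2), if g c ≠ 0 then g c else st.2))
      (xs, a)).2) := by
  induction L generalizing xs a with
  | nil => simp
  | cons c L ih =>
    obtain ⟨hc0, hcl⟩ := h c (List.mem_cons_self ..)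
    have hrest : ∀ x ∈ L, 0 ≤ x ∧ x.toNat < (xs.set c.toNat (if g c ≠ 0 then g c else a)).length := by
      intro x hx
      simpa using h x (List.mem_cons_of_mem _ hx)
    simp only [List.foldl_cons]
    rw [List.set_append_left _ _ hcl]
    exact ih _ _ hrest

-- A's forward pass computes the scan from seed a
theorem pvFwd (g : Int → Int) (n : Nat) (a : Int) :
    (PySem.List.pyRange 0 (n : Int) 1).foldl
      (fun (st : List Int × Int) c =>
        (st.1.set c.toNat (if g c ≠ 0 then g c else st.2), if g c ≠ 0 then g c else st.2))
      (List.replicate n 0, a)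
    = (pvScan a (pvVg g n), pvLast a (pvVg g n)) := by
  induction n generalizing a with
  | zero => simp [pvVg, pvScan, pvLast]
  | succ n ih =>
    have hcast : ((n + 1 : Nat) : Int) = (n : Int) + 1 := by push_cast; ring
    rw [hcast, PySem.List.pyRange_one_succ_right (by positivity), List.foldl_append,
        List.replicate_succ']
    have hmem : ∀ c ∈ PySem.List.pyRange 0 (n : Int) 1,
        0 ≤ c ∧ c.toNat < (List.replicate n (0 : Int)).length := by
      intro c hc
      rw [PySem.List.mem_pyRange_one] at hc
      constructor
      · exact hc.1
      · simp only [List.length_replicate]; omega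
    rw [pvF_split g _ _ _ _ hmem, ih]
    have hlen : (pvScan a (pvVg g n)).length = n := by
      rw [pvScan_length, pvVg_length]
    simp only [List.foldl_cons, List.foldl_nil]
    rw [List.set_append_right _ _ (by simp [hlen, Int.toNat_natCast])]
    rw [pvVg_succ, pvScan_append1, pvLast_append1]
    simp [hlen, Int.toNat_natCast]

-- A's backward loop: indices < length of the left part never touch the right part
theorem pvB_split (g : Int → Int) (L xs ys : List Int) (b : Int)
    (h : ∀ c ∈ L, 0 ≤ c ∧ c.toNat < xs.length) :
    L.foldl (fun (st : List Int × Int) c =>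
        if PySem.List.pyGetD st.1 c 0 = 0 ∧ st.2 ≠ 0 then (st.1.set c.toNat st.2, st.2)
        else if g c ≠ 0 then (st.1, PySem.List.pyGetD st.1 c 0)
        else st) (xs ++ ys, b)
    = ((L.foldl (fun (st : List Int × Int) c =>
        if PySem.List.pyGetD st.1 c 0 = 0 ∧ st.2 ≠ 0 then (st.1.set c.toNat st.2, st.2)
        else if g c ≠ 0 then (st.1, PySem.List.pyGetD st.1 c 0)
        else st) (xs, b)).1 ++ ys,
       (L.foldl (fun (st : List Int × Int) c =>
        if PySem.List.pyGetD st.1 c 0 = 0 ∧ st.2 ≠ 0 then (st.1.set c.toNat st.2, st.2)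
        else if g c ≠ 0 then (st.1, PySem.List.pyGetD st.1 c 0)
        else st) (xs, b)).2) := by
  induction L generalizing xs b with
  | nil => simp
  | cons c L ih =>
    obtain ⟨hc0, hcl⟩ := h c (List.mem_cons_self ..)
    have hget : PySem.List.pyGetD (xs ++ ys) c 0 = PySem.List.pyGetD xs c 0 := by
      rw [PySem.List.pyGetD_eq_getElem _ _ hc0 (by simp; omega),
          PySem.List.pyGetD_eq_getElem _ _ hc0 (by omega)]
      exact List.getElem_append_left hcl
    simp only [List.foldl_cons, hget]
    by_cases h1 : PySem.List.pyGetD xs c 0 = 0 ∧ b ≠ 0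
    · simp only [if_pos h1]
      rw [List.set_append_left _ _ hcl]
      exact ih _ _ (by intro x hx; simpa using h x (List.mem_cons_of_mem _ hx))
    · simp only [if_neg h1]
      by_cases h2 : g c ≠ 0
      · simp only [if_pos h2]
        exact ih _ _ (by intro x hx; exact h x (List.mem_cons_of_mem _ hx))
      · simp only [if_neg h2]
        exact ih _ _ (by intro x hx; exact h x (List.mem_cons_of_mem _ hx))

-- A's backward pass turns 'scan from a' into 'scan from the first nonzero value'
theorem pvBwd (g : Int → Int) (n : Nat) (a b : Int) :
    (PySem.List.pyRange ((n : Int) - 1) (-1) (-1)).foldl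
      (fun (st : List Int × Int) c =>
        if PySem.List.pyGetD st.1 c 0 = 0 ∧ st.2 ≠ 0 then (st.1.set c.toNat st.2, st.2)
        else if g c ≠ 0 then (st.1, PySem.List.pyGetD st.1 c 0)
        else st)
      (pvScan a (pvVg g n), b)
    = (pvScan (if a ≠ 0 then a else if pvFz (pvVg g n) ≠ 0 then pvFz (pvVg g n) else b) (pvVg g n),
       if pvFz (pvVg g n) ≠ 0 then pvFz (pvVg g n) else b) := by
  induction n generalizing a b with
  | zero =>
    rw [show ((0 : Nat) : Int) - 1 = -1 by norm_num,
        PySem.List.pyRange_neg_one_eq_nil (by norm_num)]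
    simp [pvVg, pvScan, pvFz]
  | succ n ih =>
    have hcast : ((n + 1 : Nat) : Int) - 1 = (n : Int) := by push_cast; ring
    have hVs := pvVg_succ g n
    have hlen : (pvScan a (pvVg g n)).length = n := by rw [pvScan_length, pvVg_length]
    have hmem : ∀ c ∈ PySem.List.pyRange ((n : Int) - 1) (-1) (-1),
        0 ≤ c ∧ c.toNat < (pvScan a (pvVg g n)).length := by
      intro c hc
      rw [PySem.List.mem_pyRange_neg_one] at hc
      rw [hlen]; omega
    have hget : PySem.List.pyGetD (pvScan a (pvVg g n) ++ [if g n ≠ 0 then g n else pvLast a (pvVg g n)]) (n : Int) 0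
        = (if g n ≠ 0 then g n else pvLast a (pvVg g n)) := by
      have := pvGetD_concat (pvScan a (pvVg g n)) (if g n ≠ 0 then g n else pvLast a (pvVg g n))
      rwa [hlen] at this
    rw [hcast, PySem.List.pyRange_neg_one_cons (by omega), hVs, pvScan_append1]
    simp only [List.foldl_cons, hget]
    by_cases hv : g n ≠ 0
    · -- the last value is nonzero: the 'elif' branch fires there
      simp only [if_pos hv]
      rw [if_neg (by push_neg; intro h0; exact absurd h0 hv)]
      have hget2 : PySem.List.pyGetD (pvScan a (pvVg g n) ++ [g (n : Int)]) (n : Int) 0 = g n := by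
        have := pvGetD_concat (pvScan a (pvVg g n)) (g n)
        rwa [hlen] at this
      rw [pvB_split g _ _ _ _ hmem, ih a (g n), pvFz_append1, pvScan_append1]
      by_cases hF : pvFz (pvVg g n) ≠ 0
      · simp [hF, hv]
      · push_neg at hF
        simp [hF, hv]
    · -- the last value is zero
      push_neg at hv
      have hl : (if g (n : Int) ≠ 0 then g (n : Int) else pvLast a (pvVg g n)) = pvLast a (pvVg g n) := by
        simp [hv]
      rw [hl]
      have hFap : pvFz (pvVg g n ++ [g (n : Int)]) = pvFz (pvVg g n) := by
        rw [pvFz_append1]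
        by_cases hF : pvFz (pvVg g n) ≠ 0
        · rw [if_pos hF]
        · push_neg at hF; simp [hF, hv]
      rw [hFap]
      by_cases hb1 : pvLast a (pvVg g n) = 0 ∧ b ≠ 0
      · -- the fill branch fires at the last cell
        obtain ⟨hl0, hbnz⟩ := hb1
        have hFz : pvFz (pvVg g n) = 0 := by
          by_contra hF
          exact pvLast_nz a _ hF hl0
        have hall : ∀ v ∈ pvVg g n, v = 0 := (pvFz_zero_iff _).mp hFz
        have ha0 : a = 0 := by
          have := pvLast_allzero a _ hall
          rw [this] at hl0; exact hl0
        rw [if_pos ⟨hl0, hbnz⟩]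
        rw [List.set_append_right _ _ (by rw [hlen]; simp),
            show ((n : Int).toNat - (pvScan a (pvVg g n)).length) = 0 by rw [hlen]; simp,
            List.set_cons_zero]
        rw [pvB_split g _ _ _ _ hmem, ih a b, hFz, pvScan_append1, ha0]
        have hL : ∀ x : Int, pvLast x (pvVg g n) = x := fun x => pvLast_allzero x _ hall
        simp [hv, hL]
      · -- nothing happens at the last cell
        rw [if_neg hb1, if_neg (by simpa using hv)]
        rw [pvB_split g _ _ _ _ hmem, ih a b, pvScan_append1]
        have hlast : pvLast (if a ≠ 0 then a else if pvFz (pvVg g n) ≠ 0 then pvFz (pvVg g n) else b) (pvVg g n)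
            = pvLast a (pvVg g n) := by
          by_cases hF : pvFz (pvVg g n) ≠ 0
          · exact pvLast_indep _ _ _ hF
          · push_neg at hF
            have hall : ∀ v ∈ pvVg g n, v = 0 := (pvFz_zero_iff _).mp hF
            rw [pvLast_allzero _ _ hall, pvLast_allzero _ _ hall]
            by_cases ha : a ≠ 0
            · simp [ha]
            · push_neg at ha
              have hb0 : b = 0 := by
                by_contra hb
                exact hb1 ⟨by rw [pvLast_allzero _ _ hall, ha], hb⟩
              simp [ha, hF, hb0]
        rw [hlast]
        simp [hv]

theorem pvFz_eq_bne (vs : List Int) : (vs.find? (fun v => v != 0)).getD 0 = pvFz vs := by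
  unfold pvFz
  have : (fun v : Int => v != 0) = (fun v : Int => decide (v ≠ 0)) := by
    funext v; by_cases h : v = 0 <;> simp [h]
  rw [this]

theorem pvRow_eq (w : Int) (hw : 0 ≤ w) (row : List Int) : pvArow w row = pvBrow w row := by
  obtain ⟨n, rfl⟩ : ∃ n : Nat, w = (n : Int) := ⟨w.toNat, (Int.toNat_of_nonneg hw).symm⟩
  simp only [pvArow, pvBrow, Int.toNat_natCast]
  rw [PySem.List.foldl_append_ite (fun c => PySem.List.pyGetD row c 0 ≠ 0)
        (fun c => (c, PySem.List.pyGetD row c 0)),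
      show (PySem.List.pyRange 0 (n : Int) 1).map (fun c => PySem.List.pyGetD row c 0)
          = pvVg (fun c => PySem.List.pyGetD row c 0) n from rfl,
      pvFz_eq_bne, pvB_fold,
      pvFwd (fun c => PySem.List.pyGetD row c 0) n 0,
      pvBwd (fun c => PySem.List.pyGetD row c 0) n 0 0]
  simp only [List.nil_append]
  by_cases h1 : ((PySem.List.pyRange 0 (n : Int) 1).filter
      (fun x => decide (PySem.List.pyGetD row x 0 ≠ 0))).map
      (fun c => (c, PySem.List.pyGetD row c 0)) = []
  · -- no nonzero cell in the row
    rw [if_pos h1]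
    have hfil : (PySem.List.pyRange 0 (n : Int) 1).filter
        (fun x => decide (PySem.List.pyGetD row x 0 ≠ 0)) = [] :=
      List.map_eq_nil_iff.mp h1
    have allz : ∀ v ∈ pvVg (fun c => PySem.List.pyGetD row c 0) n, v = 0 := by
      intro v hv
      rw [pvVg, List.mem_map] at hv
      obtain ⟨c, hc, rfl⟩ := hv
      by_contra hgc
      have hcmem : c ∈ (PySem.List.pyRange 0 (n : Int) 1).filter
          (fun x => decide (PySem.List.pyGetD row x 0 ≠ 0)) :=
        List.mem_filter.mpr ⟨hc, by simpa using hgc⟩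
      rw [hfil] at hcmem
      exact absurd hcmem (List.not_mem_nil)
    have hF : pvFz (pvVg (fun c => PySem.List.pyGetD row c 0) n) = 0 :=
      (pvFz_zero_iff _).mpr allz
    rw [hF, pvScan_const 0 _ (fun v hv => Or.inl (allz v hv))]
    simp [pvVg_length]
  · rw [if_neg h1]
    by_cases h2 : (PySem.Set.ofList ((((PySem.List.pyRange 0 (n : Int) 1).filter
        (fun x => decide (PySem.List.pyGetD row x 0 ≠ 0))).map
        (fun c => (c, PySem.List.pyGetD row c 0))).map (fun x => x.2))).length = 1
    · -- all nonzero cells share one value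
      rw [if_pos h2]
      have hmapsnd : (((PySem.List.pyRange 0 (n : Int) 1).filter
            (fun x => decide (PySem.List.pyGetD row x 0 ≠ 0))).map
            (fun c => (c, PySem.List.pyGetD row c 0))).map (fun p => p.2)
          = (pvVg (fun c => PySem.List.pyGetD row c 0) n).filter (fun v => decide (v ≠ 0)) := by
        rw [pvVg, List.filter_map, List.map_map]
        rfl
      rw [hmapsnd] at h2
      have hne : (pvVg (fun c => PySem.List.pyGetD row c 0) n).filter (fun v => decide (v ≠ 0)) ≠ [] := by
        intro hnil
        rw [hnil] at hmapsnd
        exact h1 (List.map_eq_nil_iff.mp hmapsnd)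
      obtain ⟨y, hy⟩ : ∃ y, PySem.Set.ofList
          ((pvVg (fun c => PySem.List.pyGetD row c 0) n).filter (fun v => decide (v ≠ 0))) = [y] := by
        rcases hl : PySem.Set.ofList
            ((pvVg (fun c => PySem.List.pyGetD row c 0) n).filter (fun v => decide (v ≠ 0))) with _ | ⟨y, t⟩
        · rw [hl] at h2; simp at h2
        · rw [hl] at h2
          simp at h2
          exact ⟨y, by rw [h2]⟩
      have hally : ∀ v ∈ (pvVg (fun c => PySem.List.pyGetD row c 0) n).filter (fun v => decide (v ≠ 0)),
          v = y := by
        intro v hv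
        have hv' : v ∈ PySem.Set.ofList
            ((pvVg (fun c => PySem.List.pyGetD row c 0) n).filter (fun v => decide (v ≠ 0))) :=
          (PySem.Set.mem_ofList _ _).mpr hv
        rw [hy] at hv'
        simpa using hv'
      have hhead : ((pvVg (fun c => PySem.List.pyGetD row c 0) n).filter
          (fun v => decide (v ≠ 0))).head? = some (pvFz (pvVg (fun c => PySem.List.pyGetD row c 0) n)) := by
        rw [List.head?_filter]
        rcases hf : (pvVg (fun c => PySem.List.pyGetD row c 0) n).find? (fun v => decide (v ≠ 0)) with _ | z
        · exact absurd (List.head?_eq_none_iff.mp (by rw [List.head?_filter, hf])) hne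
        · rw [show pvFz (pvVg (fun c => PySem.List.pyGetD row c 0) n) = z from by rw [pvFz, hf]; rfl]
      rcases hfl : ((PySem.List.pyRange 0 (n : Int) 1).filter
          (fun x => decide (PySem.List.pyGetD row x 0 ≠ 0))).map
          (fun c => (c, PySem.List.pyGetD row c 0)) with _ | ⟨p, t⟩
      · exact absurd hfl h1
      · have h5 : (pvVg (fun c => PySem.List.pyGetD row c 0) n).filter (fun v => decide (v ≠ 0))
            = p.2 :: t.map (fun q : Int × Int => q.2) := by
          rw [← hmapsnd, hfl]
          rfl
        have hp2 : p.2 = pvFz (pvVg (fun c => PySem.List.pyGetD row c 0) n) := by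
          have h6 := hhead
          rw [h5] at h6
          exact Option.some.inj h6
        have hall : ∀ v ∈ pvVg (fun c => PySem.List.pyGetD row c 0) n,
            v = 0 ∨ v = pvFz (pvVg (fun c => PySem.List.pyGetD row c 0) n) := by
          intro v hv
          by_cases hv0 : v = 0
          · exact Or.inl hv0
          · refine Or.inr ?_
            have h7 := hally v (List.mem_filter.mpr ⟨hv, by simpa using hv0⟩)
            have h8 := hally p.2 (by rw [h5]; exact List.mem_cons_self ..)
            rw [← hp2, h7, h8]
        simp only [List.headD_cons, hp2]
        rw [pvScan_const _ _ hall]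
        simp [pvVg_length]
    · -- general case: forward pass + backward fix-up = seeded scan
      rw [if_neg h2]
      by_cases hF : pvFz (pvVg (fun c => PySem.List.pyGetD row c 0) n) = 0
      · simp [hF]
      · simp [hF]

-- ===== VERDICT (by name: the statement is the Claim_ definition above) =====
theorem extend_to_border_h_spec : Claim_equal_extend_to_border_h := by
  intro grid hdom hpre
  simp only [Spec_extend_to_border_h, extend_to_border_h, extend_to_border_h_alt]
  by_cases hg : grid = [] ∨ grid.headD [] = []
  · rw [if_pos hg, if_pos hg]
  · rw [if_neg hg, if_neg hg]
    have h0 : (PySem.List.pyRange 0 (grid.length : Int) 1).map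
        (fun r => pvArow ((grid.headD []).length : Int) (PySem.List.pyGetD grid r []))
        = ((PySem.List.pyRange 0 (grid.length : Int) 1).map
            (fun j => PySem.List.pyGetD grid j [])).map (pvArow ((grid.headD []).length : Int)) := by
      rw [List.map_map]
      rfl
    rw [h0, PySem.List.map_pyGetD_pyRange_zero' grid []]
    exact List.map_congr_left
      (fun a _ => pvRow_eq ((grid.headD []).length : Int) (Int.natCast_nonneg _) a)
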